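-- pv_equiv track=rewrite | github.com/unixwzrd/venvutil | bin/filetree.py | is_path_within_allowlist
-- ===== SOURCE A (Python) =====
-- from typing import List, Sequence
--
-- def is_path_within_allowlist(
--     relative_path: str,
--     directory_allowlist: Sequence[str],
-- ) -> bool:
--     """Check whether a path belongs to a directory allowlist."""
--
--     normalized_path = relative_path.replace("\\", "/")
--
--     for allowed in directory_allowlist:
--         if normalized_path == allowed or normalized_path.startswith(f"{allowed}/"):
--             return True
--
--     return False
-- ===== SOURCE B (Python) =====
-- def is_path_within_allowlist(relative_path, directory_allowlist):
--     """Check whether a path belongs to a directory allowlist.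
--
--     Instead of scanning the allowlist and testing prefixes, build the set of
--     allowlist entries once and iterate over the path's '/' positions, checking
--     each ancestor prefix (and the whole path) for membership."""
--     normalized = relative_path.replace("\\", "/")
--     allowed = set(directory_allowlist)
--     if normalized in allowed:
--         return True
--     return any(normalized[:i] in allowed
--                for i, ch in enumerate(normalized) if ch == "/")
-- ===== Notes on version B (the rewrite author's own statement) =====
-- stated objective: alternative
-- what changed: B inverts the iteration: instead of scanning the allowlist and testing equality/startswith for each entry, it builds a set of the allowlist once and iterates over the path's '/' positions, testing each ancestor prefix (and the full path) for set membership.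
import Mathlib
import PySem

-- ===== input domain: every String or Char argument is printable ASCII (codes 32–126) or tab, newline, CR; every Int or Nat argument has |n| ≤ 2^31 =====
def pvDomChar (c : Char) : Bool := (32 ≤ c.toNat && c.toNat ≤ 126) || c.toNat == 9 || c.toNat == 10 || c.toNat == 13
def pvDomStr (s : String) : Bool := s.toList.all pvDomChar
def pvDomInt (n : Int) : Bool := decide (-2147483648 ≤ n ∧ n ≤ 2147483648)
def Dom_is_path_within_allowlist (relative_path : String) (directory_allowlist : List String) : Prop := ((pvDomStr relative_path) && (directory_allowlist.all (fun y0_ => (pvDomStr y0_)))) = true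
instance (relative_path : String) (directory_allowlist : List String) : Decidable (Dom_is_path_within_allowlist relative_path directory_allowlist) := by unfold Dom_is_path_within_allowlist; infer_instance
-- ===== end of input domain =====

-- B inverts the iteration: it builds a set of the allowlist once and tests the path's ancestor prefixes
-- (cut before each '/') plus the full path for membership, instead of scanning the allowlist with startswith.


-- ===== PORT A =====
-- the for-loop with early 'return True' over the allowlist, as a short-circuiting any
def is_path_within_allowlist (relative_path : String) (directory_allowlist : List String) : Bool :=
  let normalized_path := PySem.Chars.replace relative_path.toList ['\\'] ['/']
  directory_allowlist.any (fun allowed =>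
    normalized_path == allowed.toList || PySem.Chars.startswith normalized_path (allowed.toList ++ ['/']))

-- ===== PORT B =====
def is_path_within_allowlist_alt (relative_path : String) (directory_allowlist : List String) : Bool :=
  let normalized := PySem.Chars.replace relative_path.toList ['\\'] ['/']
  let allowed : PySem.Set (List Char) := PySem.Set.ofList (directory_allowlist.map String.toList)
  if PySem.Set.contains allowed normalized then true
  else (PySem.List.enumerate normalized).any (fun p =>
    p.2 == '/' && PySem.Set.contains allowed (PySem.List.slice normalized none (some p.1)))

-- ===== PRECONDITION & SPEC =====
def Spec_is_path_within_allowlist (relative_path : String) (directory_allowlist : List String) (out : Bool) : Prop := out = is_path_within_allowlist_alt relative_path directory_allowlist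
instance (relative_path : String) (directory_allowlist : List String) (out : Bool) : Decidable (Spec_is_path_within_allowlist relative_path directory_allowlist out) := by unfold Spec_is_path_within_allowlist; infer_instance

-- ===== CLAIM (what is proved, stated in full; the proofs are below) =====
def Claim_equal_is_path_within_allowlist : Prop := ∀ (relative_path : String) (directory_allowlist : List String), Dom_is_path_within_allowlist relative_path directory_allowlist → Spec_is_path_within_allowlist relative_path directory_allowlist (is_path_within_allowlist relative_path directory_allowlist)

-- ===== LEMMAS AND PROOFS =====

-- a prefix p followed by '/' is exactly an ancestor cut before some '/' of nc
lemma startswith_slash_iff (nc p : List Char) :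
    PySem.Chars.startswith nc (p ++ ['/']) = true ↔
      ∃ (i : Nat) (h : i < nc.length), nc[i] = '/' ∧ nc.take i = p := by
  rw [PySem.Chars.startswith_iff]
  constructor
  · rintro ⟨t, ht⟩
    refine ⟨p.length, by simp [← ht], ?_, ?_⟩
    · simp [← ht]
    · simp [← ht]
  · rintro ⟨i, h, hc, htake⟩
    refine ⟨nc.drop (i + 1), ?_⟩
    calc p ++ ['/'] ++ nc.drop (i + 1)
        = nc.take i ++ nc[i] :: nc.drop (i + 1) := by simp [htake, hc]
      _ = nc.take i ++ nc.drop i := by rw [List.getElem_cons_drop]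
      _ = nc := List.take_append_drop ..

-- both ports decide the same proposition about nc and the allowlist
lemma both_iff (nc : List Char) (wl : List String) :
    (wl.any (fun a => nc == a.toList || PySem.Chars.startswith nc (a.toList ++ ['/']))) =
    (if PySem.Set.contains (PySem.Set.ofList (wl.map String.toList)) nc then true
     else (PySem.List.enumerate nc).any (fun p =>
        p.2 == '/' && PySem.Set.contains (PySem.Set.ofList (wl.map String.toList))
          (PySem.List.slice nc none (some p.1)))) := by
  have hmem : ∀ x : List Char,
      (PySem.Set.contains (PySem.Set.ofList (wl.map String.toList)) x = true) ↔ x ∈ wl.map String.toList :=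
    fun x => by rw [PySem.Set.contains_iff, PySem.Set.mem_ofList]
  rcases Bool.eq_false_or_eq_true (wl.any (fun a => nc == a.toList || PySem.Chars.startswith nc (a.toList ++ ['/']))) with hA | hA <;> rw [hA]
  · -- A is true: some allowlist entry matches; show B finds it
    rw [List.any_eq_true] at hA
    obtain ⟨a, ha, hcond⟩ := hA
    rcases Bool.or_eq_true .. |>.mp hcond with heq | hsw
    · rw [if_pos]
      rw [hmem, List.mem_map]
      exact ⟨a, ha, by simpa using (beq_iff_eq.mp heq).symm⟩
    · by_cases hfull : PySem.Set.contains (PySem.Set.ofList (wl.map String.toList)) nc = true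
      · rw [if_pos hfull]
      · rw [if_neg hfull]
        symm
        rw [List.any_eq_true]
        rw [startswith_slash_iff] at hsw
        obtain ⟨i, hi, hc, htake⟩ := hsw
        refine ⟨((0 : Int) + i, nc[i]), ?_, ?_⟩
        · rw [PySem.List.mem_enumerate_iff]; exact ⟨i, hi, rfl⟩
        · simp only [Bool.and_eq_true, beq_iff_eq]
          refine ⟨hc, ?_⟩
          rw [hmem, List.mem_map]
          exact ⟨a, ha, by simpa [PySem.List.slice_to_natCast] using htake.symm⟩
  · -- A is false: the full path is not in the set and no prefix test succeeds
    rw [List.any_eq_false] at hA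
    have hnotin : PySem.Set.contains (PySem.Set.ofList (wl.map String.toList)) nc = false := by
      rw [Bool.eq_false_iff, Ne, hmem, List.mem_map]
      rintro ⟨a, ha, hs⟩
      exact hA a ha (by simp [hs])
    rw [hnotin, if_neg (by simp)]
    symm
    rw [List.any_eq_false]
    rintro ⟨i, c⟩ hp
    rw [PySem.List.mem_enumerate_iff] at hp
    obtain ⟨k, hk, hpe⟩ := hp
    cases hpe
    rw [Bool.not_eq_true, Bool.and_eq_false_iff]
    by_cases hc : nc[k] = '/'
    · right
      rw [Bool.eq_false_iff, Ne, hmem, List.mem_map]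
      rintro ⟨a, ha, hs⟩
      refine hA a ha ?_
      simp only [Bool.or_eq_true]
      right
      rw [startswith_slash_iff]
      exact ⟨k, hk, hc, by simpa [PySem.List.slice_to_natCast] using hs.symm⟩
    · left; simpa using hc
-- ===== VERDICT (by name: the statement is the Claim_ definition above) =====
theorem is_path_within_allowlist_spec : Claim_equal_is_path_within_allowlist := by
  intro rp wl _
  unfold Spec_is_path_within_allowlist is_path_within_allowlist is_path_within_allowlist_alt
  exact both_iff _ wl
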